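-- pv_equiv track=rewrite | github.com/syedshahabrar/Tic-tac-toe | tic tac toe.py | checkIfLegal
-- ===== SOURCE A (Python) =====
-- def checkIfLegal (number, board):
--     count = 1
--     if number > 0 and number <= (len(board) * len(board)): #check to see if value is in range
--         for i in range(len(board)):
--             for j in range(len(board)):
--                 if count == number:
--                     if board[i][j] != 'X' and board[i][j] != 'O': #check to see if position is already taken
--                         return True
--                     return False
--                 count += 1
--     return False
-- ===== SOURCE B (Python) =====
-- def checkIfLegal(number, board):
--     n = len(board)
--     if not (0 < number <= n * n):
--         return False
--     i, j = divmod(number - 1, n)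
--     return board[i][j] != 'X' and board[i][j] != 'O'
-- ===== Notes on version B (the rewrite author's own statement) =====
-- stated objective: simpler
-- what changed: Replaced the nested counting scan over all cells by direct index arithmetic i,j = divmod(number-1, n) followed by a single cell check.
import Mathlib
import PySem

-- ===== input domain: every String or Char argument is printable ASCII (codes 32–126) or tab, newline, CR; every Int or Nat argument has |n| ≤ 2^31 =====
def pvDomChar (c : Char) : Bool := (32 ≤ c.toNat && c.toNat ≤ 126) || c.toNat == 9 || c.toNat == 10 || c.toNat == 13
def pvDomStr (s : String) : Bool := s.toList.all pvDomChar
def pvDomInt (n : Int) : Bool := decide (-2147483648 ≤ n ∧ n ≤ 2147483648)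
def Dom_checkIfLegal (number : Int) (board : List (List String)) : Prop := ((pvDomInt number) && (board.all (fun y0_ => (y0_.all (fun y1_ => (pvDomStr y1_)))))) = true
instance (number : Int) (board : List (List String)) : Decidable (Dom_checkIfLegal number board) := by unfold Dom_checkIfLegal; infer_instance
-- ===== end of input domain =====

-- B replaces A's nested counting scan over the cells by direct divmod index arithmetic: simpler, not measured faster.

-- ===== PORT A =====
-- board[i][j]; where Python raises IndexError (excluded by Pre_) this defaults to ""
def checkIfLegalCellA (board : List (List String)) (i j : Int) : String :=
  ((PySem.List.pyGet? board i).bind (fun row => PySem.List.pyGet? row j)).getD ""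

-- the nested 'for i … for j …' loop, flattened into its sequence of (i, j) pairs, threading count
def checkIfLegalLoop (number : Int) (board : List (List String)) : List (Int × Int) → Int → Bool
  | [], _ => false
  | (i, j) :: rest, count =>
    if count = number then
      if checkIfLegalCellA board i j ≠ "X" ∧ checkIfLegalCellA board i j ≠ "O" then true
      else false
    else checkIfLegalLoop number board rest (count + 1)

def checkIfLegal (number : Int) (board : List (List String)) : Bool :=
  if number > 0 ∧ number ≤ (board.length : Int) * (board.length : Int) then
    checkIfLegalLoop number board
      ((PySem.List.pyRange 0 (board.length : Int) 1).flatMap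
        (fun i => (PySem.List.pyRange 0 (board.length : Int) 1).map (fun j => (i, j)))) 1
  else false

-- ===== PORT B =====
def checkIfLegal_alt (number : Int) (board : List (List String)) : Bool :=
  let n : Int := board.length
  if 0 < number ∧ number ≤ n * n then
    let i := PySem.Int.floordiv (number - 1) n
    let j := PySem.Int.mod (number - 1) n
    -- board[i][j]; IndexError (excluded by Pre_) defaults to ""
    let cell := ((PySem.List.pyGet? board i).bind (fun row => PySem.List.pyGet? row j)).getD ""
    if cell ≠ "X" ∧ cell ≠ "O" then true else false
  else false

-- ===== PRECONDITION & SPEC =====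
-- Pre_ excludes exactly the inputs on which Python A raises IndexError: an in-range number whose
-- target row is too short (a ragged board); Python B raises there too.
def Pre_checkIfLegal (number : Int) (board : List (List String)) : Prop :=
  (0 < number ∧ number ≤ (board.length : Int) * (board.length : Int)) →
    ((PySem.List.pyGet? board (PySem.Int.floordiv (number - 1) (board.length : Int))).all
      (fun row => decide (PySem.Int.mod (number - 1) (board.length : Int) < (row.length : Int)))) = true
instance (number : Int) (board : List (List String)) : Decidable (Pre_checkIfLegal number board) := by
  unfold Pre_checkIfLegal; infer_instance

def pvWitness_checkIfLegal : Int × List (List String) := (3, [["X", "-"], ["O", "-"]])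

def Spec_checkIfLegal (number : Int) (board : List (List String)) (out : Bool) : Prop := out = checkIfLegal_alt number board
instance (number : Int) (board : List (List String)) (out : Bool) : Decidable (Spec_checkIfLegal number board out) := by unfold Spec_checkIfLegal; infer_instance

-- ===== CLAIM (what is proved, stated in full; the proofs are below) =====
def Claim_equal_checkIfLegal : Prop := ∀ (number : Int) (board : List (List String)), Dom_checkIfLegal number board → Pre_checkIfLegal number board → Spec_checkIfLegal number board (checkIfLegal number board)

-- ===== LEMMAS AND PROOFS =====

-- A's flattened loop just selects the (number - count)-th pair and tests its cell.
lemma checkIfLegalLoop_spec (number : Int) (board : List (List String)) :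
    ∀ (ps : List (Int × Int)) (count : Int), count ≤ number →
      checkIfLegalLoop number board ps count =
        (match ps[(number - count).toNat]? with
         | some (i, j) =>
             if checkIfLegalCellA board i j ≠ "X" ∧ checkIfLegalCellA board i j ≠ "O" then true
             else false
         | none => false) := by
  intro ps
  induction ps with
  | nil => intro count _; simp [checkIfLegalLoop]
  | cons p rest ih =>
    intro count hcount
    obtain ⟨i, j⟩ := p
    by_cases h : count = number
    · subst h
      simp [checkIfLegalLoop]
    · have h1 : count + 1 ≤ number := by omega
      have h2 : (number - count).toNat = (number - (count + 1)).toNat + 1 := by omega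
      rw [checkIfLegalLoop, if_neg h, ih (count + 1) h1, h2]
      simp

-- index into a flatMap whose blocks all have length m
lemma getElem?_flatMap_uniform {α β : Type} (f : α → List β) (m : Nat) (hm : 0 < m) :
    ∀ (xs : List α), (∀ x ∈ xs, (f x).length = m) → ∀ (k : Nat),
      (xs.flatMap f)[k]? = (xs[k / m]?).bind (fun x => (f x)[k % m]?) := by
  intro xs
  induction xs with
  | nil => intro _ k; simp
  | cons x rest ih =>
    intro hlen k
    have hx : (f x).length = m := hlen x (by simp)
    have hrest : ∀ y ∈ rest, (f y).length = m := fun y hy => hlen y (by simp [hy])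
    by_cases hk : k < m
    · rw [List.flatMap_cons, List.getElem?_append_left (by omega),
        Nat.div_eq_of_lt hk, Nat.mod_eq_of_lt hk]
      simp
    · obtain ⟨k', rfl⟩ : ∃ k', k = k' + m := ⟨k - m, by omega⟩
      rw [List.flatMap_cons, List.getElem?_append_right (by omega)]
      have e1 : k' + m - (f x).length = k' := by omega
      rw [e1, ih hrest k', Nat.add_div_right _ hm, Nat.add_mod_right]
      simp

-- the k-th pair of the flattened n×n grid is (k / n, k % n)
lemma pairs_get (n k : Nat) (hk : k < n * n) :
    (((PySem.List.pyRange 0 (n : Int) 1).flatMap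
        (fun i => (PySem.List.pyRange 0 (n : Int) 1).map (fun j => (i, j)))))[k]? =
      some (((k / n : Nat) : Int), ((k % n : Nat) : Int)) := by
  have hn : 0 < n := by
    rcases Nat.eq_zero_or_pos n with h0 | h0
    · rw [h0] at hk; omega
    · exact h0
  have hlenR : (PySem.List.pyRange 0 (n : Int) 1).length = n := by
    rw [PySem.List.length_pyRange_one]; simp
  have hdiv : k / n < n := Nat.div_lt_of_lt_mul hk
  have hmod : k % n < n := Nat.mod_lt _ hn
  rw [getElem?_flatMap_uniform _ n hn _ (fun x _ => by simp [hlenR]) k]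
  rw [List.getElem?_eq_getElem (by rw [hlenR]; exact hdiv), PySem.List.getElem_pyRange_one]
  rw [Option.bind_some, List.getElem?_map,
    List.getElem?_eq_getElem (by rw [hlenR]; exact hmod), PySem.List.getElem_pyRange_one]
  simp

-- ===== VERDICT (by name: the statement is the Claim_ definition above) =====
theorem checkIfLegal_spec : Claim_equal_checkIfLegal := by
  intro number board _ _
  unfold Spec_checkIfLegal checkIfLegal checkIfLegal_alt
  simp only []
  by_cases hg : 0 < number ∧ number ≤ (board.length : Int) * (board.length : Int)
  · rw [if_pos ⟨hg.1, hg.2⟩, if_pos hg]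
    set n := board.length with hn
    set k := (number - 1).toNat with hk
    have hknum : (number - 1) = (k : Int) := by omega
    have hkZ : (k : Int) < (n : Int) * (n : Int) := by
      rw [← hknum]; linarith [hg.2]
    have hkn : k < n * n := by exact_mod_cast hkZ
    rw [checkIfLegalLoop_spec number board _ 1 (by omega)]
    have h1 : (number - 1).toNat = k := rfl
    rw [h1, pairs_get n k hkn, hknum, PySem.Int.floordiv_natCast, PySem.Int.mod_natCast]
    simp only [checkIfLegalCellA]
    rfl
  · rw [if_neg (by exact fun hc => hg ⟨hc.1, hc.2⟩), if_neg hg]
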